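-- pv_equiv track=rewrite | github.com/Kodluyoruz-Gaziantep-PyFlask-Bootcamp/kodluyoruz_python_tutorials | hafta2/sayitahmini/yardimci_fonksiyonlar.py | get_distance_message
-- ===== SOURCE A (Python) =====
-- def get_distance_message(number,guess):
--
-- 	messages = [
-- 		(0,"Buldunuz"),
-- 		(5,"Nerdeyse buldun"),
-- 		(12,"Çok Yakın"),
-- 		(18,"Yakın"),
-- 		(25,"Az Uzak"),
-- 		(30,"Uzak"),
-- 		(40,"Çok Uzak"),
-- 	]
-- 	diff = number-guess
--
-- 	message = ""
-- 	if diff!=0: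
-- 		message = "Daha küçük giriniz : " if diff<0 else "Daha büyük giriniz : "
--
-- 	for x in messages:
-- 		if abs(diff)<=x[0]:
-- 			message += x[1]
-- 			break
--
-- 	return message
-- ===== SOURCE B (Python) =====
-- def _bisect_left(xs, x, lo, hi):
--     while lo < hi:
--         mid = (lo + hi) // 2
--         if xs[mid] < x:
--             lo = mid + 1
--         else:
--             hi = mid
--     return lo
--
-- _CUTOFFS = [0, 5, 12, 18, 25, 30, 40]
-- _LABELS = ["Buldunuz", "Nerdeyse buldun", "Çok Yakın", "Yakın", "Az Uzak", "Uzak", "Çok Uzak"]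
--
-- def get_distance_message(number, guess):
--     diff = number - guess
--     if diff == 0:
--         message = ""
--     elif diff < 0:
--         message = "Daha küçük giriniz : "
--     else:
--         message = "Daha büyük giriniz : "
--     idx = _bisect_left(_CUTOFFS, abs(diff), 0, len(_CUTOFFS))
--     if idx < len(_LABELS):
--         message += _LABELS[idx]
--     return message
-- ===== Notes on version B (the rewrite author's own statement) =====
-- stated objective: alternative
-- what changed: Replaced A's linear first-match scan over (threshold, label) pairs by a bisect_left binary search into a sorted cutoff table with a parallel label list.
import Mathlib
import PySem

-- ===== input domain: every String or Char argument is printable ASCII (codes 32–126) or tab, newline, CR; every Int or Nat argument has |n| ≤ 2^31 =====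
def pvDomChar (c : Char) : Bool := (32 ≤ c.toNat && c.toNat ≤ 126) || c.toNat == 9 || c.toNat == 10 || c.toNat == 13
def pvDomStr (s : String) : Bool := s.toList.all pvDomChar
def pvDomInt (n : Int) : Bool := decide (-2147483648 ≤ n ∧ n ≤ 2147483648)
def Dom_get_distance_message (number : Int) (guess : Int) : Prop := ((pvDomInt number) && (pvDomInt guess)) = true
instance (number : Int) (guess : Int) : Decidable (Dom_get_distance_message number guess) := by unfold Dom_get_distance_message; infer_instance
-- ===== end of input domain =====

-- B replaces A's linear first-match scan over (threshold, label) pairs by a binary search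
-- (bisect_left) into a sorted cutoff table with a parallel label list; objective: alternative.

-- ===== PORT A =====
-- A's for-loop with break: append the label of the first pair whose threshold bounds |diff|.
def pvFirstLabel (a : Int) : List (Int × String) → String
  | [] => ""
  | (t, s) :: rest => if a ≤ t then s else pvFirstLabel a rest

def get_distance_message (number : Int) (guess : Int) : String :=
  let messages : List (Int × String) :=
    [(0, "Buldunuz"), (5, "Nerdeyse buldun"), (12, "Çok Yakın"), (18, "Yakın"),
     (25, "Az Uzak"), (30, "Uzak"), (40, "Çok Uzak")]
  let diff := number - guess
  let message : String :=
    if diff ≠ 0 then (if diff < 0 then "Daha küçük giriniz : " else "Daha büyük giriniz : ")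
    else ""
  message ++ pvFirstLabel |diff| messages

-- ===== PORT B =====
-- hand-written bisect_left (the while loop of Source B)
def pvBisectLeft (xs : List Int) (x : Int) (lo hi : Nat) : Nat :=
  if h : lo < hi then
    let mid := (lo + hi) / 2
    if xs.getD mid 0 < x then pvBisectLeft xs x (mid + 1) hi
    else pvBisectLeft xs x lo mid
  else lo
termination_by hi - lo
decreasing_by all_goals omega

def pvCutoffs : List Int := [0, 5, 12, 18, 25, 30, 40]
def pvLabels : List String :=
  ["Buldunuz", "Nerdeyse buldun", "Çok Yakın", "Yakın", "Az Uzak", "Uzak", "Çok Uzak"]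

def get_distance_message_alt (number : Int) (guess : Int) : String :=
  let diff := number - guess
  let message : String :=
    if diff = 0 then ""
    else if diff < 0 then "Daha küçük giriniz : "
    else "Daha büyük giriniz : "
  let idx := pvBisectLeft pvCutoffs |diff| 0 pvCutoffs.length
  if idx < pvLabels.length then message ++ pvLabels.getD idx "" else message

-- ===== PRECONDITION & SPEC =====
def Spec_get_distance_message (number : Int) (guess : Int) (out : String) : Prop := out = get_distance_message_alt number guess
instance (number : Int) (guess : Int) (out : String) : Decidable (Spec_get_distance_message number guess out) := by unfold Spec_get_distance_message; infer_instance

-- ===== CLAIM (what is proved, stated in full; the proofs are below) =====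
def Claim_equal_get_distance_message : Prop := ∀ (number : Int) (guess : Int), Dom_get_distance_message number guess → Spec_get_distance_message number guess (get_distance_message number guess)

-- ===== LEMMAS AND PROOFS =====

-- one step of the binary search, with the midpoint given explicitly
theorem pvBisectLeft_step (xs : List Int) (x : Int) (lo hi mid : Nat)
    (h : lo < hi) (hm : mid = (lo + hi) / 2) :
    pvBisectLeft xs x lo hi =
      (if xs.getD mid 0 < x then pvBisectLeft xs x (mid + 1) hi
       else pvBisectLeft xs x lo mid) := by
  subst hm; rw [pvBisectLeft]; simp [h]

theorem pvBisectLeft_stop (xs : List Int) (x : Int) (lo : Nat) :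
    pvBisectLeft xs x lo lo = lo := by
  rw [pvBisectLeft]; simp

-- closed evaluation of the binary search on the cutoff table
theorem pvBisect_eval (a : Int) :
    pvBisectLeft pvCutoffs a 0 7 =
      (if a ≤ 0 then 0 else if a ≤ 5 then 1 else if a ≤ 12 then 2 else if a ≤ 18 then 3
       else if a ≤ 25 then 4 else if a ≤ 30 then 5 else if a ≤ 40 then 6 else 7) := by
  rw [pvBisectLeft_step pvCutoffs a 0 7 3 (by omega) (by norm_num)]
  by_cases h18 : a ≤ 18
  · rw [if_neg (show ¬ pvCutoffs.getD 3 0 < a from by show ¬ (18:Int) < a; omega),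
      pvBisectLeft_step pvCutoffs a 0 3 1 (by omega) (by norm_num)]
    by_cases h5 : a ≤ 5
    · rw [if_neg (show ¬ pvCutoffs.getD 1 0 < a from by show ¬ (5:Int) < a; omega),
        pvBisectLeft_step pvCutoffs a 0 1 0 (by omega) (by norm_num)]
      by_cases h0 : a ≤ 0
      · rw [if_neg (show ¬ pvCutoffs.getD 0 0 < a from by show ¬ (0:Int) < a; omega),
          pvBisectLeft_stop]
        split_ifs <;> omega
      · rw [if_pos (show pvCutoffs.getD 0 0 < a from by show (0:Int) < a; omega),
          pvBisectLeft_stop]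
        split_ifs <;> omega
    · rw [if_pos (show pvCutoffs.getD 1 0 < a from by show (5:Int) < a; omega),
        pvBisectLeft_step pvCutoffs a 2 3 2 (by omega) (by norm_num)]
      by_cases h12 : a ≤ 12
      · rw [if_neg (show ¬ pvCutoffs.getD 2 0 < a from by show ¬ (12:Int) < a; omega),
          pvBisectLeft_stop]
        split_ifs <;> omega
      · rw [if_pos (show pvCutoffs.getD 2 0 < a from by show (12:Int) < a; omega),
          pvBisectLeft_stop]
        split_ifs <;> omega
  · rw [if_pos (show pvCutoffs.getD 3 0 < a from by show (18:Int) < a; omega),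
      pvBisectLeft_step pvCutoffs a 4 7 5 (by omega) (by norm_num)]
    by_cases h30 : a ≤ 30
    · rw [if_neg (show ¬ pvCutoffs.getD 5 0 < a from by show ¬ (30:Int) < a; omega),
        pvBisectLeft_step pvCutoffs a 4 5 4 (by omega) (by norm_num)]
      by_cases h25 : a ≤ 25
      · rw [if_neg (show ¬ pvCutoffs.getD 4 0 < a from by show ¬ (25:Int) < a; omega),
          pvBisectLeft_stop]
        split_ifs <;> omega
      · rw [if_pos (show pvCutoffs.getD 4 0 < a from by show (25:Int) < a; omega),
          pvBisectLeft_stop]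
        split_ifs <;> omega
    · rw [if_pos (show pvCutoffs.getD 5 0 < a from by show (30:Int) < a; omega),
        pvBisectLeft_step pvCutoffs a 6 7 6 (by omega) (by norm_num)]
      by_cases h40 : a ≤ 40
      · rw [if_neg (show ¬ pvCutoffs.getD 6 0 < a from by show ¬ (40:Int) < a; omega),
          pvBisectLeft_stop]
        split_ifs <;> omega
      · rw [if_pos (show pvCutoffs.getD 6 0 < a from by show (40:Int) < a; omega),
          pvBisectLeft_stop]
        split_ifs <;> omega

-- the two label computations agree for every distance
theorem pvLabel_eq (a : Int) :
    pvFirstLabel a [((0:Int), "Buldunuz"), (5, "Nerdeyse buldun"), (12, "Çok Yakın"), (18, "Yakın"),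
                    (25, "Az Uzak"), (30, "Uzak"), (40, "Çok Uzak")] =
      (if pvBisectLeft pvCutoffs a 0 pvCutoffs.length < pvLabels.length then
        pvLabels.getD (pvBisectLeft pvCutoffs a 0 pvCutoffs.length) "" else "") := by
  have hlen : pvCutoffs.length = 7 := by decide
  rw [hlen, pvBisect_eval a]
  by_cases h0 : a ≤ 0 <;> by_cases h5 : a ≤ 5 <;> by_cases h12 : a ≤ 12 <;>
    by_cases h18 : a ≤ 18 <;> by_cases h25 : a ≤ 25 <;> by_cases h30 : a ≤ 30 <;>
    by_cases h40 : a ≤ 40 <;>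
  first
    | omega
    | simp [pvFirstLabel, pvLabels, h0, h5, h12, h18, h25, h30, h40]

-- ===== VERDICT (by name: the statement is the Claim_ definition above) =====
theorem get_distance_message_spec : Claim_equal_get_distance_message := by
  intro number guess _
  unfold Spec_get_distance_message get_distance_message get_distance_message_alt
  simp only []
  rw [pvLabel_eq |number - guess|]
  by_cases hidx : pvBisectLeft pvCutoffs |number - guess| 0 pvCutoffs.length < pvLabels.length <;>
    by_cases hz : number - guess = 0 <;>
    simp [hidx, hz]
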